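-- pv_equiv track=rewrite | github.com/mercyyyy101/Diamond-Gen | bot.py | parse_steam_file
-- ===== SOURCE A (Python) =====
-- def parse_steam_file(text: str):
--     results = []
--     lines = [l.rstrip() for l in text.splitlines()]
--     i = 0
--     while i < len(lines):
--         line = lines[i].strip()
--         if not line:
--             i += 1
--             continue
--         if "|" in line and ":" in line.split("|")[0]:
--             creds, games = line.split("|", 1)
--             user, pwd = creds.split(":", 1)
--             if user.strip() and pwd.strip():
--                 results.append((user.strip(), pwd.strip(), games.strip()))
--             i += 1
--             continue
--         norm = line.replace(" - ", "|")
--         if "|" in norm and ":" in norm.split("|")[0]: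
--             creds, games = norm.split("|", 1)
--             user, pwd = creds.split(":", 1)
--             if user.strip() and pwd.strip() and games.strip():
--                 results.append((user.strip(), pwd.strip(), games.strip()))
--             i += 1
--             continue
--         block = []
--         while i < len(lines) and lines[i].strip():
--             block.append(lines[i].strip())
--             i += 1
--         cred_idx = None
--         for j, bl in enumerate(block):
--             if ":" in bl:
--                 user_part = bl.split(":", 1)[0]
--                 if user_part and " " not in user_part:
--                     cred_idx = j
--                     break
--         if cred_idx is None:
--             continue
--         game_lines = [bl for bl in block[:cred_idx] if bl]
--         cred_line = block[cred_idx]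
--         user, pwd = cred_line.split(":", 1)
--         user, pwd = user.strip(), pwd.strip()
--         if not user or not pwd:
--             continue
--         games = ", ".join(game_lines) if game_lines else ""
--         results.append((user, pwd, games))
--     return results
-- ===== SOURCE B (Python) =====
-- def _as_cred(line, need_games):
--     # index-based matcher: first '|' at p, first ':' at c; a credential line iff 0 <= c < p
--     p, c = line.find("|"), line.find(":")
--     if not (0 <= c < p):
--         return None
--     user, pwd, games = line[:c].strip(), line[c + 1:p].strip(), line[p + 1:].strip()
--     if user and pwd and (games or not need_games):
--         return [(user, pwd, games)]
--     return []
--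
--
-- def parse_steam_file(text: str):
--     # streaming state machine: mode 0 = expecting credential lines, 1 = collecting a
--     # block's game lines, 2 = block finished (skip to next blank line)
--     results, mode, games = [], 0, []
--     for raw in text.splitlines():
--         s = raw.strip()
--         if not s:
--             mode, games = 0, []
--             continue
--         if mode == 2:
--             continue
--         if mode == 0:
--             hit = _as_cred(s, False)
--             if hit is None:
--                 hit = _as_cred(s.replace(" - ", "|"), True)
--             if hit is not None:
--                 results.extend(hit)
--                 continue
--             mode, games = 1, []
--         # mode 1: look for this block's credential line
--         c = s.find(":")
--         if c > 0 and " " not in s[:c]: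
--             user, pwd = s[:c].strip(), s[c + 1:].strip()
--             if user and pwd:
--                 results.append((user, pwd, ", ".join(games)))
--             mode = 2
--         else:
--             games.append(s)
--     return results
-- ===== Notes on version B (the rewrite author's own statement) =====
-- stated objective: alternative
-- what changed: A walks an index through the lines with a nested block-collecting while, an enumerate search and list slicing; B is a single streaming pass: a three-mode state machine (scan credentials / collect game lines / skip) folded over the lines, matching credential lines by find-index arithmetic and slicing instead of split calls.
import Mathlib
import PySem

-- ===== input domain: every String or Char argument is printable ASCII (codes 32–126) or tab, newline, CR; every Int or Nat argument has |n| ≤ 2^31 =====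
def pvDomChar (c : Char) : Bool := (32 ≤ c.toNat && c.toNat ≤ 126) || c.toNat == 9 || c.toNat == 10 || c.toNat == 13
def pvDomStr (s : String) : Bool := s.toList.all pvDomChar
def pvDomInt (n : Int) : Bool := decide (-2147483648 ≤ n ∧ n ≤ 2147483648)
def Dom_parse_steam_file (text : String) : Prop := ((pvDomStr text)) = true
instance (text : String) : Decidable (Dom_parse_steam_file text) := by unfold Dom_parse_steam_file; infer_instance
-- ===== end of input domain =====

-- B replaces A's nested index-driven while loops (inner block collector, enumerate search,
-- list slicing) by a single streaming pass: a three-mode state machine folded over the lines,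
-- with find-index arithmetic instead of split calls; objective: alternative, same cost.

-- ===== PORT A =====
-- s.split(sep, 1) destructured into two parts (both programs only destructure after
-- checking 'sep in s', where split(sep, 1) has exactly two parts)
def pvSplit1 (s sep : String) : String × String :=
  match PySem.Str.splitMax? s sep 1 with
  | some (a :: b :: _) => (a, b)
  | some [a] => (a, "")
  | _ => ("", "")

-- s.split(sep)[0]
def pvHead0 (s sep : String) : String :=
  match PySem.Str.split? s sep with
  | some (a :: _) => a
  | _ => ""

-- A's inner while: collect stripped non-blank lines into `block`, return (block, remaining lines)
def psfInner : List String → List String × List String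
  | [] => ([], [])
  | l :: rest =>
    if PySem.Str.strip l ≠ "" then
      let p := psfInner rest
      (PySem.Str.strip l :: p.1, p.2)
    else ([], l :: rest)

-- A's `for j, bl in enumerate(block)` search with break: first index whose line looks like a credential
def psfFindIdx : Nat → List String → Option Nat
  | _, [] => none
  | j, bl :: bs =>
    if PySem.Str.isIn ":" bl then
      let up := (pvSplit1 bl ":").1
      if up ≠ "" ∧ ¬ PySem.Str.isIn " " up then some j
      else psfFindIdx (j + 1) bs
    else psfFindIdx (j + 1) bs

-- A's block tail: cred_idx, game_lines, the credential emission
def psfBlock (block : List String) : List (String × String × String) :=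
  match psfFindIdx 0 block with
  | none => []
  | some k =>
    let game_lines := (block.take k).filter (fun bl => bl ≠ "")
    let cred_line := block.getD k ""
    let cg := pvSplit1 cred_line ":"
    let user := PySem.Str.strip cg.1
    let pwd := PySem.Str.strip cg.2
    if user = "" ∨ pwd = "" then []
    else [(user, pwd, if game_lines ≠ [] then PySem.Str.join ", " game_lines else "")]

-- termination helpers for A's main loop (cited in decreasing_by)
theorem psfInner_snd_le (ls : List String) : (psfInner ls).2.length ≤ ls.length := by
  induction ls with
  | nil => simp [psfInner]
  | cons l rest ih =>
    by_cases h : PySem.Str.strip l ≠ ""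
    · simp only [psfInner, if_pos h]; exact Nat.le_succ_of_le ih
    · simp only [psfInner, if_neg h]
      exact Nat.le_refl _

theorem psfInner_snd_lt (l : String) (rest : List String) (h : PySem.Str.strip l ≠ "") :
    (psfInner (l :: rest)).2.length < (l :: rest).length := by
  simp only [psfInner, if_pos h, List.length_cons]
  exact Nat.lt_succ_of_le (psfInner_snd_le rest)

-- A's outer while over the remaining lines
def psfLoop : List String → List (String × String × String)
  | [] => []
  | l :: rest =>
    let line := PySem.Str.strip l
    if h1 : line = "" then psfLoop rest
    else if PySem.Str.isIn "|" line ∧ PySem.Str.isIn ":" (pvHead0 line "|") then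
      let cg := pvSplit1 line "|"
      let up := pvSplit1 cg.1 ":"
      (if PySem.Str.strip up.1 ≠ "" ∧ PySem.Str.strip up.2 ≠ "" then
        [(PySem.Str.strip up.1, PySem.Str.strip up.2, PySem.Str.strip cg.2)]
      else []) ++ psfLoop rest
    else
      let norm := PySem.Str.replace line " - " "|"
      if PySem.Str.isIn "|" norm ∧ PySem.Str.isIn ":" (pvHead0 norm "|") then
        let cg := pvSplit1 norm "|"
        let up := pvSplit1 cg.1 ":"
        (if PySem.Str.strip up.1 ≠ "" ∧ PySem.Str.strip up.2 ≠ "" ∧ PySem.Str.strip cg.2 ≠ "" then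
          [(PySem.Str.strip up.1, PySem.Str.strip up.2, PySem.Str.strip cg.2)]
        else []) ++ psfLoop rest
      else
        psfBlock (psfInner (l :: rest)).1 ++ psfLoop (psfInner (l :: rest)).2
  termination_by ls => ls.length
  decreasing_by
  all_goals first
    | (exact psfInner_snd_lt l rest h1)
    | (simp only [List.length_cons]; omega)

def parse_steam_file (text : String) : List (String × String × String) :=
  psfLoop ((PySem.Str.splitlines text).map PySem.Str.rstrip)

-- ===== PORT B =====
-- Source B _as_cred: first '|' at p, first ':' at c; a credential line iff 0 <= c < p (none = no match)
def altCred (line : String) (need_games : Bool) : Option (List (String × String × String)) :=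
  let p := PySem.Str.find line "|"
  let c := PySem.Str.find line ":"
  if 0 ≤ c ∧ c < p then
    let user := PySem.Str.strip (PySem.Str.slice line none (some c))
    let pwd := PySem.Str.strip (PySem.Str.slice line (some (c + 1)) (some p))
    let games := PySem.Str.strip (PySem.Str.slice line (some (p + 1)) none)
    some (if user ≠ "" ∧ pwd ≠ "" ∧ (games ≠ "" ∨ need_games = false) then
      [(user, pwd, games)] else [])
  else none

-- Source B loop body: state = (results, mode, games); mode 0 = expecting credential lines,
-- 1 = collecting a block's game lines, 2 = block finished (skip to next blank line)
def altStep (st : List (String × String × String) × Nat × List String) (raw : String) :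
    List (String × String × String) × Nat × List String :=
  let s := PySem.Str.strip raw
  if s = "" then (st.1, 0, [])
  else if st.2.1 = 2 then st
  else
    let hit := if st.2.1 = 0 then
        (match altCred s false with
         | some r => some r
         | none => altCred (PySem.Str.replace s " - " "|") true)
      else none
    match hit with
    | some r => (st.1 ++ r, st.2.1, st.2.2)
    | none =>
      let games := if st.2.1 = 0 then [] else st.2.2
      let c := PySem.Str.find s ":"
      if 0 < c ∧ ¬ PySem.Str.isIn " " (PySem.Str.slice s none (some c)) then
        let user := PySem.Str.strip (PySem.Str.slice s none (some c))
        let pwd := PySem.Str.strip (PySem.Str.slice s (some (c + 1)) none)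
        (if user ≠ "" ∧ pwd ≠ "" then st.1 ++ [(user, pwd, PySem.Str.join ", " games)] else st.1,
         2, games)
      else (st.1, 1, games ++ [s])

def parse_steam_file_alt (text : String) : List (String × String × String) :=
  ((PySem.Str.splitlines text).foldl altStep ([], 0, [])).1

-- ===== PRECONDITION & SPEC =====
def Spec_parse_steam_file (text : String) (out : List (String × String × String)) : Prop := out = parse_steam_file_alt text
instance (text : String) (out : List (String × String × String)) : Decidable (Spec_parse_steam_file text out) := by unfold Spec_parse_steam_file; infer_instance

-- ===== CLAIM (what is proved, stated in full; the proofs are below) =====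
def Claim_equal_parse_steam_file : Prop := ∀ (text : String), Dom_parse_steam_file text → Spec_parse_steam_file text (parse_steam_file text)

-- ===== LEMMAS AND PROOFS =====

-- ---------- single-character string facts: find / split / slice through the first index ----------

-- first index of the character ch
def pvIdx (cs : List Char) (ch : Char) : Option Nat := cs.findIdx? (fun a => ch = a)

theorem pvFindGo (ch : Char) (cs : List Char) (k : Nat) :
    PySem.Chars.find.go [ch] cs k =
      match pvIdx cs ch with
      | none => -1
      | some j => ((k + j : Nat) : Int) := by
  induction cs generalizing k with
  | nil => simp [PySem.Chars.find.go, pvIdx]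
  | cons a l ih =>
    by_cases h : ch = a
    · simp [PySem.Chars.find.go, pvIdx, List.findIdx?_cons, h]
    · simp only [PySem.Chars.find.go, pvIdx, List.findIdx?_cons]
      rw [ih]
      simp only [pvIdx]
      cases hfi : l.findIdx? (fun a => ch = a) with
      | none => simp [h]
      | some j => simp [h, Option.map]; ring

theorem pvFind (ch : Char) (cs : List Char) :
    PySem.Chars.find cs [ch] =
      match pvIdx cs ch with
      | none => -1
      | some j => (j : Int) := by
  unfold PySem.Chars.find
  rw [pvFindGo]
  cases pvIdx cs ch <;> simp

theorem pvIsIn (ch : Char) (cs : List Char) :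
    PySem.Chars.isIn [ch] cs = true ↔ ch ∈ cs := by
  rw [PySem.Chars.isIn_iff_infix]
  constructor
  · intro h; exact h.subset (by simp)
  · intro h
    obtain ⟨p, q, rfl⟩ := List.append_of_mem h
    exact ⟨p, q, by simp⟩

theorem pvIdx_none (ch : Char) (cs : List Char) : pvIdx cs ch = none ↔ ch ∉ cs := by
  unfold pvIdx
  rw [List.findIdx?_eq_none_iff]
  constructor
  · intro h hm; simpa using h ch hm
  · intro h x hx
    simp only [decide_eq_false_iff_not]
    rintro rfl; exact h hx

theorem pvIdx_spec (ch : Char) (cs : List Char) (j : Nat) (h : pvIdx cs ch = some j) :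
    ∃ hj : j < cs.length, cs[j] = ch ∧ ∀ i, i < j → cs[i]? ≠ some ch := by
  unfold pvIdx at h
  rw [List.findIdx?_eq_some_iff_getElem] at h
  obtain ⟨hj, h1, h2⟩ := h
  refine ⟨hj, by simpa [eq_comm] using h1, ?_⟩
  intro i hij hc
  have hi : i < cs.length := by omega
  have := h2 i hij
  simp only [decide_eq_true_eq] at this
  rw [List.getElem?_eq_getElem hi] at hc
  exact this (by simpa using hc.symm)

theorem pvMem_take (ch : Char) (cs : List Char) (n : Nat) :
    ch ∈ cs.take n ↔ ∃ j, pvIdx cs ch = some j ∧ j < n := by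
  constructor
  · intro h
    cases hfi : pvIdx cs ch with
    | none =>
      exact absurd (List.mem_of_mem_take h) ((pvIdx_none ch cs).mp hfi)
    | some j =>
      refine ⟨j, rfl, ?_⟩
      obtain ⟨i, hi, hgi⟩ := List.mem_iff_getElem.mp h
      obtain ⟨hj, hcj, hfirst⟩ := pvIdx_spec ch cs j hfi
      rw [List.length_take] at hi
      have hi' : i < cs.length := by omega
      rw [List.getElem_take] at hgi
      by_contra hjn
      have hij : i < j := by omega
      exact hfirst i hij (by rw [List.getElem?_eq_getElem hi']; simp [hgi])
  · rintro ⟨j, hfi, hjn⟩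
    obtain ⟨hj, hcj, _⟩ := pvIdx_spec ch cs j hfi
    rw [List.mem_iff_getElem]
    exact ⟨j, by simp [List.length_take]; omega, by rw [List.getElem_take]; exact hcj⟩

-- split with maxsplit: the go loop, maxsplit 0 and 1
theorem pvSplitMaxGo0 (ch : Char) (cs cur : List Char) (acc : List (List Char)) (fuel : Nat)
    (hf : cs.length < fuel) :
    PySem.Chars.splitOnMax.go [ch] fuel 0 cs cur acc = acc.reverse ++ [cur.reverse ++ cs] := by
  cases fuel with
  | zero => omega
  | succ f =>
    cases cs with
    | nil => rw [PySem.Chars.splitOnMax.go] <;> simp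
    | cons a l => rw [PySem.Chars.splitOnMax.go]; simp

theorem pvSplitMaxGo1 (ch : Char) (cs cur : List Char) (acc : List (List Char)) (fuel : Nat)
    (hf : cs.length < fuel) :
    PySem.Chars.splitOnMax.go [ch] fuel 1 cs cur acc =
      acc.reverse ++ (match pvIdx cs ch with
        | some j => [cur.reverse ++ cs.take j, cs.drop (j+1)]
        | none => [cur.reverse ++ cs]) := by
  induction cs generalizing cur acc fuel with
  | nil =>
    cases fuel with
    | zero => omega
    | succ f => rw [PySem.Chars.splitOnMax.go] <;> simp [pvIdx]
  | cons a l ih =>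
    cases fuel with
    | zero => omega
    | succ f =>
      rw [PySem.Chars.splitOnMax.go]
      by_cases h : ch = a
      · have hp : [ch].isPrefixOf (a :: l) = true := by simp [List.isPrefixOf, h]
        simp only [if_neg (by omega : ¬ (1 = 0)), hp, if_pos]
        rw [pvSplitMaxGo0 ch _ _ _ f (by simp at hf ⊢; omega)]
        simp [pvIdx, List.findIdx?_cons, h]
      · have hp : [ch].isPrefixOf (a :: l) = false := by
          simp [List.isPrefixOf]; exact fun hh => (h hh).elim
        simp only [if_neg (by omega : ¬ (1 = 0)), hp, Bool.false_eq_true, if_false]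
        rw [ih (a :: cur) acc f (by simp at hf ⊢; omega)]
        simp only [pvIdx, List.findIdx?_cons]
        cases hfi : l.findIdx? (fun a => ch = a) with
        | none => simp [h]
        | some j => simp [h, Option.map]

theorem pvSplitMax1 (ch : Char) (cs : List Char) :
    PySem.Chars.splitOnMax cs [ch] 1 =
      match pvIdx cs ch with
      | some j => [cs.take j, cs.drop (j+1)]
      | none => [cs] := by
  unfold PySem.Chars.splitOnMax
  rw [if_neg (by norm_num)]
  have h1 : Int.toNat 1 = 1 := by decide
  rw [h1, pvSplitMaxGo1 ch cs [] [] (cs.length+1) (by omega)]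
  cases pvIdx cs ch <;> simp

-- full split: unconditional equations for the go loop, then its accumulator and head
theorem pvGoNilEq (ch : Char) (cur : List Char) (acc : List (List Char)) (f : Nat) :
    PySem.Chars.splitOn.go [ch] (f+1) [] cur acc = acc.reverse ++ [cur.reverse] := by
  rw [PySem.Chars.splitOn.go]
  · simp
  · omega

theorem pvGoConsEq (ch a : Char) (l cur : List Char) (acc : List (List Char)) (f : Nat) :
    PySem.Chars.splitOn.go [ch] (f+1) (a :: l) cur acc =
      if ch = a then PySem.Chars.splitOn.go [ch] f l [] (cur.reverse :: acc)
      else PySem.Chars.splitOn.go [ch] f l (a :: cur) acc := by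
  rw [PySem.Chars.splitOn.go]
  by_cases h : ch = a
  · have hp : [ch].isPrefixOf (a :: l) = true := by simp [List.isPrefixOf, h]
    simp [h]
  · have hp : [ch].isPrefixOf (a :: l) = false := by
      simp [List.isPrefixOf]; exact fun hh => (h hh).elim
    simp [hp, h]

theorem pvSplitOnGoAcc (ch : Char) (cs cur : List Char) (acc : List (List Char)) (fuel : Nat)
    (hf : cs.length < fuel) :
    PySem.Chars.splitOn.go [ch] fuel cs cur acc =
      acc.reverse ++ PySem.Chars.splitOn.go [ch] fuel cs cur [] := by
  induction cs generalizing cur acc fuel with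
  | nil =>
    cases fuel with
    | zero => omega
    | succ f => rw [pvGoNilEq, pvGoNilEq]; simp
  | cons a l ih =>
    cases fuel with
    | zero => omega
    | succ f =>
      have hl : l.length < f := by simp at hf; omega
      rw [pvGoConsEq, pvGoConsEq]
      by_cases h : ch = a
      · rw [if_pos h, if_pos h,
          ih [] (cur.reverse :: acc) f hl, ih [] [cur.reverse] f hl]
        simp
      · rw [if_neg h, if_neg h, ih (a :: cur) acc f hl]

theorem pvSplitOnGoHead (ch : Char) (cs cur : List Char) (fuel : Nat)
    (hf : cs.length < fuel) :
    ∃ rest, PySem.Chars.splitOn.go [ch] fuel cs cur [] =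
      (cur.reverse ++ (match pvIdx cs ch with
        | some j => cs.take j
        | none => cs)) :: rest := by
  induction cs generalizing cur fuel with
  | nil =>
    cases fuel with
    | zero => omega
    | succ f => exact ⟨[], by rw [pvGoNilEq]; simp [pvIdx]⟩
  | cons a l ih =>
    cases fuel with
    | zero => omega
    | succ f =>
      have hl : l.length < f := by simp at hf; omega
      rw [pvGoConsEq]
      by_cases h : ch = a
      · rw [if_pos h, pvSplitOnGoAcc ch l [] [cur.reverse] f hl]
        exact ⟨PySem.Chars.splitOn.go [ch] f l [] [], by simp [pvIdx, List.findIdx?_cons, h]⟩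
      · rw [if_neg h]
        obtain ⟨rest, hrest⟩ := ih (a :: cur) f hl
        refine ⟨rest, ?_⟩
        rw [hrest]
        simp only [pvIdx, List.findIdx?_cons]
        cases hfi : l.findIdx? (fun a => ch = a) with
        | none => simp [h]
        | some j => simp [h, Option.map]

-- Str-level characterisations of the helpers both ports use
theorem pvSplit1_char (s : String) (ch : Char) (sep : String) (hsep : sep.toList = [ch])
    (j : Nat) (hj : pvIdx s.toList ch = some j) :
    pvSplit1 s sep = (String.ofList (s.toList.take j), String.ofList (s.toList.drop (j+1))) := by
  unfold pvSplit1
  unfold PySem.Str.splitMax?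
  unfold PySem.Chars.splitMax?
  rw [hsep]
  rw [if_neg (by simp), pvSplitMax1, hj]
  simp

theorem pvHead0_char (s : String) (ch : Char) (sep : String) (hsep : sep.toList = [ch]) :
    pvHead0 s sep = String.ofList (match pvIdx s.toList ch with
      | some j => s.toList.take j
      | none => s.toList) := by
  unfold pvHead0
  unfold PySem.Str.split?
  unfold PySem.Chars.split?
  rw [hsep, if_neg (by simp)]
  unfold PySem.Chars.splitOn
  obtain ⟨rest, hrest⟩ := pvSplitOnGoHead ch s.toList [] (s.toList.length + 1) (by omega)
  rw [hrest]
  simp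

theorem pvStripEmpty (cs : List Char) :
    (String.ofList cs = "") ↔ cs = [] := by
  constructor
  · intro h
    have := congrArg String.toList h
    simpa using this
  · rintro rfl; rfl

-- ---------- strip ∘ rstrip = strip ----------
theorem pvDropCommute (p : Char → Bool) (l : List Char) :
    List.dropWhile p (List.rdropWhile p l) = List.rdropWhile p (List.dropWhile p l) := by
  by_cases hd : List.dropWhile p l = []
  · have hall : ∀ x ∈ l, p x = true := List.dropWhile_eq_nil_iff.mp hd
    have h1 : List.rdropWhile p l = [] := List.rdropWhile_eq_nil_iff.mpr hall
    simp [hd, h1]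
  · have hsplit : List.takeWhile p l ++ List.dropWhile p l = l := List.takeWhile_append_dropWhile
    have hb : p ((List.dropWhile p l).head hd) = false := List.head_dropWhile_not p hd
    -- rdropWhile over the decomposition
    have hr : List.rdropWhile p l = List.takeWhile p l ++ List.rdropWhile p (List.dropWhile p l) := by
      conv_lhs => rw [← hsplit]
      unfold List.rdropWhile
      rw [List.reverse_append, List.dropWhile_append]
      have hne : List.dropWhile p (List.dropWhile p l).reverse ≠ [] := by
        rw [Ne, List.dropWhile_eq_nil_iff]
        intro hall
        have hmem : (List.dropWhile p l).head hd ∈ (List.dropWhile p l).reverse := by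
          simp [List.head_mem]
        have := hall _ hmem
        rw [hb] at this; exact Bool.false_ne_true this
      rw [if_neg (by simpa using hne)]
      simp
    rw [hr, List.dropWhile_append]
    have hdw : List.dropWhile p (List.takeWhile p l) = [] :=
      List.dropWhile_eq_nil_iff.mpr (fun x hx => List.mem_takeWhile_imp hx)
    rw [hdw]
    simp only [List.isEmpty_nil, if_pos]
    -- dropWhile of rdropWhile (dropWhile p l): its head (if any) fails p
    cases hrd : List.rdropWhile p (List.dropWhile p l) with
    | nil => simp
    | cons x xs =>
      have hx : x = (List.dropWhile p l).head hd := by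
        have hpre := List.rdropWhile_prefix p (List.dropWhile p l)
        rw [hrd] at hpre
        obtain ⟨t, ht⟩ := hpre
        have h2 : List.dropWhile p l = x :: (xs ++ t) := by rw [← ht]; simp
        simp [h2]
      rw [List.dropWhile_cons, hx, hb]
      simp

theorem pvStripRstrip (s : String) :
    PySem.Str.strip (PySem.Str.rstrip s) = PySem.Str.strip s := by
  have hR : ∀ cs : List Char, (List.dropWhile PySem.Chars.isspace cs.reverse).reverse
      = List.rdropWhile PySem.Chars.isspace cs := fun _ => rfl
  unfold PySem.Str.strip PySem.Str.rstrip
  refine congrArg String.ofList ?_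
  rw [String.toList_ofList]
  unfold PySem.Chars.strip PySem.Chars.lstrip PySem.Chars.rstrip
  rw [hR, hR, hR, pvDropCommute, List.rdropWhile_idempotent]

theorem pvIdx_take (cs : List Char) (ch : Char) (j n : Nat)
    (hj : pvIdx cs ch = some j) (hn : j < n) :
    pvIdx (cs.take n) ch = some j := by
  obtain ⟨hjl, hcj, hfirst⟩ := pvIdx_spec ch cs j hj
  unfold pvIdx
  rw [List.findIdx?_eq_some_iff_getElem]
  refine ⟨by simp [List.length_take]; omega, ?_, ?_⟩
  · simp only [List.getElem_take, hcj, decide_eq_true_eq]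
  · intro k hk
    have hkl : k < cs.length := by omega
    simp only [List.getElem_take, decide_eq_true_eq]
    intro hc
    exact hfirst k hk (by rw [List.getElem?_eq_getElem hkl]; simp [hc])

-- literal one-character strings, as lists
theorem pvPipeList : ("|" : String).toList = ['|'] := by decide
theorem pvColonList : (":" : String).toList = [':'] := by decide

-- Str.find on a one-character needle, through pvIdx
theorem pvStrFind (s : String) (ch : Char) (sub : String) (hsub : sub.toList = [ch]) :
    PySem.Str.find s sub =
      match pvIdx s.toList ch with
      | none => -1
      | some j => (j : Int) := by
  unfold PySem.Str.find
  rw [hsub, pvFind]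

theorem pvStrIsIn (s : String) (ch : Char) (sub : String) (hsub : sub.toList = [ch]) :
    PySem.Str.isIn sub s = true ↔ ch ∈ s.toList := by
  unfold PySem.Str.isIn
  rw [hsub, pvIsIn]

-- the A-shaped credential emission (what psfLoop's two leading branches build)
def credA (line : String) (ng : Bool) : List (String × String × String) :=
  let cg := pvSplit1 line "|"
  let up := pvSplit1 cg.1 ":"
  if PySem.Str.strip up.1 ≠ "" ∧ PySem.Str.strip up.2 ≠ "" ∧
      (PySem.Str.strip cg.2 ≠ "" ∨ ng = false) then
    [(PySem.Str.strip up.1, PySem.Str.strip up.2, PySem.Str.strip cg.2)]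
  else []

theorem altCred_eq (line : String) (ng : Bool) :
    altCred line ng =
      if PySem.Str.isIn "|" line ∧ PySem.Str.isIn ":" (pvHead0 line "|") then
        some (credA line ng)
      else none := by
  unfold altCred
  rw [pvStrFind line '|' "|" pvPipeList, pvStrFind line ':' ":" pvColonList]
  cases hp : pvIdx line.toList '|' with
  | none =>
    have hA : ¬ (PySem.Str.isIn "|" line = true ∧ PySem.Str.isIn ":" (pvHead0 line "|") = true) := by
      rintro ⟨h1, _⟩
      exact (pvIdx_none '|' line.toList).mp hp ((pvStrIsIn line '|' "|" pvPipeList).mp h1)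
    rw [if_neg hA]
    cases hc : pvIdx line.toList ':' with
    | none => simp
    | some j => rw [if_neg (by rintro ⟨h1, h2⟩; simp at h1 h2; have := Int.natCast_nonneg j; omega)]
  | some p =>
    rw [pvHead0_char line '|' "|" pvPipeList, hp]
    cases hc : pvIdx line.toList ':' with
    | none =>
      have hA : ¬ (PySem.Str.isIn "|" line = true ∧
          PySem.Str.isIn ":" (String.ofList (line.toList.take p)) = true) := by
        rintro ⟨_, h2⟩
        have := (pvStrIsIn _ ':' ":" pvColonList).mp h2
        rw [String.toList_ofList] at this
        exact (pvIdx_none ':' line.toList).mp hc (List.mem_of_mem_take this)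
      rw [if_neg hA, if_neg (by simp)]
    | some c =>
      by_cases hcp : c < p
      · have hB : (0 : Int) ≤ (c : Int) ∧ (c : Int) < (p : Int) := by
          constructor <;> [positivity; exact_mod_cast hcp]
        rw [if_pos hB]
        have hA : PySem.Str.isIn "|" line = true ∧
            PySem.Str.isIn ":" (String.ofList (line.toList.take p)) = true := by
          constructor
          · rw [pvStrIsIn line '|' "|" pvPipeList]
            obtain ⟨hpl, hcp', _⟩ := pvIdx_spec '|' line.toList p hp
            exact hcp' ▸ List.getElem_mem hpl
          · rw [pvStrIsIn _ ':' ":" pvColonList, String.toList_ofList, pvMem_take]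
            exact ⟨c, hc, hcp⟩
        rw [if_pos hA]
        -- both sides build the same three strings
        have hcg := pvSplit1_char line '|' "|" pvPipeList p hp
        have hup := pvSplit1_char (String.ofList (line.toList.take p)) ':' ":" pvColonList c
          (by rw [String.toList_ofList]; exact pvIdx_take line.toList ':' c p hc hcp)
        rw [String.toList_ofList] at hup
        have b1 : PySem.Str.slice line none (some ((c : Nat) : Int)) =
            String.ofList (line.toList.take c) := by
          unfold PySem.Str.slice
          rw [PySem.Chars.slice_eq_listSlice, PySem.List.slice_to _ (by positivity)]
          norm_num
        have b2 : PySem.Str.slice line (some (((c : Nat) : Int) + 1)) (some ((p : Nat) : Int)) =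
            String.ofList ((line.toList.drop (c+1)).take (p - (c+1))) := by
          unfold PySem.Str.slice
          rw [PySem.Chars.slice_eq_listSlice,
            PySem.List.slice_toNat _ (by positivity) (by positivity)]
          have h1 : ((c : Int) + 1).toNat = c + 1 := by omega
          have h2 : ((p : Int)).toNat = p := by omega
          rw [h1, h2]
        have b3 : PySem.Str.slice line (some (((p : Nat) : Int) + 1)) none =
            String.ofList (line.toList.drop (p+1)) := by
          unfold PySem.Str.slice
          rw [PySem.Chars.slice_eq_listSlice, PySem.List.slice_from _ (by positivity)]
          have h1 : ((p : Int) + 1).toNat = p + 1 := by omega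
          rw [h1]
        have e1 : (line.toList.take p).take c = line.toList.take c := by
          rw [List.take_take]; congr 1; omega
        have e2 : (line.toList.take p).drop (c+1) = (line.toList.drop (c+1)).take (p - (c+1)) :=
          List.drop_take
        simp only [credA, hcg, hup, b1, b2, b3, e1, e2]
      · have hB : ¬ ((0 : Int) ≤ (c : Int) ∧ (c : Int) < (p : Int)) := by
          rintro ⟨_, h2⟩
          exact hcp (by exact_mod_cast h2)
        rw [if_neg hB]
        have hA : ¬ (PySem.Str.isIn "|" line = true ∧
            PySem.Str.isIn ":" (String.ofList (line.toList.take p)) = true) := by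
          rintro ⟨_, h2⟩
          rw [pvStrIsIn _ ':' ":" pvColonList, String.toList_ofList, pvMem_take] at h2
          obtain ⟨j, hj, hjp⟩ := h2
          rw [hc] at hj
          exact hcp (by injection hj with h; omega)
        rw [if_neg hA]

-- ---------- proof-side run semantics (A-shaped) ----------

-- per-line credential matcher, A-shaped (psfLoop's two leading branches)
def runTry (line : String) : Option (List (String × String × String)) :=
  if PySem.Str.isIn "|" line ∧ PySem.Str.isIn ":" (pvHead0 line "|") then
    let cg := pvSplit1 line "|"
    let up := pvSplit1 cg.1 ":"
    some (if PySem.Str.strip up.1 ≠ "" ∧ PySem.Str.strip up.2 ≠ "" then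
      [(PySem.Str.strip up.1, PySem.Str.strip up.2, PySem.Str.strip cg.2)]
    else [])
  else
    let norm := PySem.Str.replace line " - " "|"
    if PySem.Str.isIn "|" norm ∧ PySem.Str.isIn ":" (pvHead0 norm "|") then
      some (if PySem.Str.strip (pvSplit1 (pvSplit1 norm "|").1 ":").1 ≠ "" ∧
               PySem.Str.strip (pvSplit1 (pvSplit1 norm "|").1 ":").2 ≠ "" ∧
               PySem.Str.strip (pvSplit1 norm "|").2 ≠ "" then
        [(PySem.Str.strip (pvSplit1 (pvSplit1 norm "|").1 ":").1,
          PySem.Str.strip (pvSplit1 (pvSplit1 norm "|").1 ":").2,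
          PySem.Str.strip (pvSplit1 norm "|").2)]
      else [])
    else none

-- B's credential chain equals the A-shaped matcher
theorem hitChain_eq (s : String) :
    (match altCred s false with
     | some r => some r
     | none => altCred (PySem.Str.replace s " - " "|") true) = runTry s := by
  rw [altCred_eq, altCred_eq]
  unfold runTry
  by_cases h1 : PySem.Str.isIn "|" s = true ∧ PySem.Str.isIn ":" (pvHead0 s "|") = true
  · rw [if_pos h1, if_pos h1]
    unfold credA
    simp
  · rw [if_neg h1, if_neg h1]
    by_cases h2 : PySem.Str.isIn "|" (PySem.Str.replace s " - " "|") = true ∧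
        PySem.Str.isIn ":" (pvHead0 (PySem.Str.replace s " - " "|") "|") = true
    · rw [if_pos h2, if_pos h2]
      unfold credA
      simp
    · rw [if_neg h2, if_neg h2]

-- A's block scan with a games accumulator
def blockGo (games : List String) : List String → List (String × String × String)
  | [] => []
  | bl :: bs =>
    if PySem.Str.isIn ":" bl then
      let up := pvSplit1 bl ":"
      if up.1 ≠ "" ∧ ¬ PySem.Str.isIn " " up.1 then
        let user := PySem.Str.strip up.1
        let pwd := PySem.Str.strip up.2
        if user ≠ "" ∧ pwd ≠ "" then [(user, pwd, PySem.Str.join ", " games)] else []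
      else blockGo (games ++ [bl]) bs
    else blockGo (games ++ [bl]) bs

-- one run: leading credential lines one by one, the remainder as one block
def runSem : List String → List (String × String × String)
  | [] => []
  | s :: rest =>
    match runTry s with
    | some r => r ++ runSem rest
    | none => blockGo [] (s :: rest)

-- B's block-line test and parts equal A's split-based ones
theorem blockTest_eq (bl : String) :
    ((0 < PySem.Str.find bl ":" ∧
        ¬ PySem.Str.isIn " " (PySem.Str.slice bl none (some (PySem.Str.find bl ":"))) = true) ↔
      (PySem.Str.isIn ":" bl = true ∧ (pvSplit1 bl ":").1 ≠ "" ∧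
        ¬ PySem.Str.isIn " " (pvSplit1 bl ":").1 = true)) ∧
    (PySem.Str.isIn ":" bl = true →
      PySem.Str.slice bl none (some (PySem.Str.find bl ":")) = (pvSplit1 bl ":").1 ∧
      PySem.Str.slice bl (some (PySem.Str.find bl ":" + 1)) none = (pvSplit1 bl ":").2) := by
  rw [pvStrFind bl ':' ":" pvColonList]
  cases hc : pvIdx bl.toList ':' with
  | none =>
    have hni : ¬ PySem.Str.isIn ":" bl = true := by
      rw [pvStrIsIn bl ':' ":" pvColonList]
      exact (pvIdx_none ':' bl.toList).mp hc
    constructor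
    · constructor
      · rintro ⟨h0, _⟩; simp at h0
      · rintro ⟨h0, _⟩; exact absurd h0 hni
    · intro h0; exact absurd h0 hni
  | some j =>
    have hi : PySem.Str.isIn ":" bl = true := by
      rw [pvStrIsIn bl ':' ":" pvColonList]
      obtain ⟨hjl, hcj, _⟩ := pvIdx_spec ':' bl.toList j hc
      exact hcj ▸ List.getElem_mem hjl
    obtain ⟨hjl, _, _⟩ := pvIdx_spec ':' bl.toList j hc
    have hsp := pvSplit1_char bl ':' ":" pvColonList j hc
    have b1 : PySem.Str.slice bl none (some ((j : Nat) : Int)) =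
        String.ofList (bl.toList.take j) := by
      unfold PySem.Str.slice
      rw [PySem.Chars.slice_eq_listSlice, PySem.List.slice_to _ (by positivity)]
      norm_num
    have b2 : PySem.Str.slice bl (some (((j : Nat) : Int) + 1)) none =
        String.ofList (bl.toList.drop (j+1)) := by
      unfold PySem.Str.slice
      rw [PySem.Chars.slice_eq_listSlice, PySem.List.slice_from _ (by positivity)]
      have h1 : ((j : Int) + 1).toNat = j + 1 := by omega
      rw [h1]
    simp only [hsp, b1, b2]
    constructor
    · constructor
      · rintro ⟨h0, hsp2⟩
        refine ⟨hi, ?_, hsp2⟩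
        rw [Ne, pvStripEmpty]
        intro htake
        have : j = 0 ∨ bl.toList = [] := by
          rcases Nat.eq_zero_or_pos j with hj0 | hj0
          · exact Or.inl hj0
          · right
            have := List.take_eq_nil_iff.mp htake
            rcases this with h | h
            · exact absurd h (by omega)
            · exact h
        rcases this with hj0 | hnil
        · subst hj0; simp at h0
        · rw [hnil] at hjl; simp at hjl
      · rintro ⟨_, hne, hsp2⟩
        refine ⟨?_, hsp2⟩
        rw [Ne, pvStripEmpty] at hne
        have hj0 : j ≠ 0 := by
          rintro rfl
          exact hne (List.take_zero)
        simp
        omega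
    · intro _; refine ⟨?_, ?_⟩ <;> trivial

-- ---------- A's loops reduce to runs (as in the block decomposition) ----------

theorem psfFindIdx_shift (bs : List String) (j : Nat) :
    psfFindIdx j bs = (psfFindIdx 0 bs).map (· + j) := by
  induction bs generalizing j with
  | nil => simp [psfFindIdx]
  | cons bl t ih =>
    simp only [psfFindIdx]
    split_ifs with h1 h2
    · simp
    · rw [ih (j + 1), ih 1, Option.map_map]
      congr 1; funext k; simp; omega
    · rw [ih (j + 1), ih 1, Option.map_map]
      congr 1; funext k; simp; omega

theorem psfLoop_nil : psfLoop [] = [] := by rw [psfLoop.eq_def]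

-- the credential emission both block scanners perform
def pvEmit (gl : List String) (cl : String) : List (String × String × String) :=
  let cg := pvSplit1 cl ":"
  let user := PySem.Str.strip cg.1
  let pwd := PySem.Str.strip cg.2
  if user = "" ∨ pwd = "" then []
  else [(user, pwd, PySem.Str.join ", " gl)]

theorem blockGo_eq (bs : List String) (games : List String) :
    blockGo games bs =
      match psfFindIdx 0 bs with
      | none => []
      | some k => pvEmit (games ++ bs.take k) (bs.getD k "") := by
  induction bs generalizing games with
  | nil => simp [blockGo, psfFindIdx]
  | cons bl t ih =>
    by_cases hc : PySem.Str.isIn ":" bl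
    · by_cases hu : (pvSplit1 bl ":").1 ≠ "" ∧ ¬ PySem.Str.isIn " " (pvSplit1 bl ":").1
      · simp only [blockGo, psfFindIdx, if_pos hc, if_pos hu, pvEmit]
        simp only [List.take_zero, List.getD_cons_zero, List.append_nil]
        split_ifs with h1 h2 <;> simp_all
      · simp only [blockGo, psfFindIdx, if_pos hc, if_neg hu]
        rw [ih (games ++ [bl]), psfFindIdx_shift t 1]
        cases psfFindIdx 0 t with
        | none => simp
        | some k => simp [List.take_succ_cons]
    · simp only [blockGo, psfFindIdx, if_neg hc]
      rw [ih (games ++ [bl]), psfFindIdx_shift t 1]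
      cases psfFindIdx 0 t with
      | none => simp
      | some k => simp [List.take_succ_cons]

theorem psfBlock_eq_blockGo (blk : List String) (hne : ∀ x ∈ blk, x ≠ "") :
    psfBlock blk = blockGo [] blk := by
  rw [blockGo_eq]
  unfold psfBlock
  cases hfi : psfFindIdx 0 blk with
  | none => rfl
  | some k =>
    have hfilter : (blk.take k).filter (fun bl => bl ≠ "") = blk.take k := by
      rw [List.filter_eq_self]
      intro x hx
      simpa using hne x (List.mem_of_mem_take hx)
    simp only [hfilter, pvEmit, List.nil_append]
    by_cases hg : blk.take k = []
    · simp [hg, PySem.Str.join]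
    · simp [hg]

-- head of the remaining lines is blank (or there are none): where A's inner while stops
def pvHeadBlank (ls : List String) : Prop := ls = [] ∨ ∃ b t, ls = b :: t ∧ PySem.Str.strip b = ""

theorem psfInner_run (run ls : List String) (hrun : ∀ x ∈ run, PySem.Str.strip x ≠ "")
    (hls : pvHeadBlank ls) :
    psfInner (run ++ ls) = (run.map PySem.Str.strip, ls) := by
  induction run with
  | nil =>
    rcases hls with h | ⟨b, t, rfl, hb⟩
    · simp [h, psfInner]
    · simp [psfInner, hb]
  | cons l rest ih =>
    have hl : PySem.Str.strip l ≠ "" := hrun l (List.mem_cons_self)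
    simp only [List.cons_append, psfInner, if_pos hl]
    rw [ih (fun x hx => hrun x (List.mem_cons_of_mem _ hx))]
    simp

theorem psfLoop_run (run ls : List String) (hrun : ∀ x ∈ run, PySem.Str.strip x ≠ "")
    (hls : pvHeadBlank ls) :
    psfLoop (run ++ ls) = runSem (run.map PySem.Str.strip) ++ psfLoop ls := by
  induction run with
  | nil => simp [runSem]
  | cons b bs ih =>
    have hb : PySem.Str.strip b ≠ "" := hrun b (List.mem_cons_self)
    have ihbs := ih (fun x hx => hrun x (List.mem_cons_of_mem _ hx))
    simp only [List.cons_append, List.map_cons]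
    rw [psfLoop.eq_def]
    simp only [dif_neg hb]
    by_cases h1 : PySem.Str.isIn "|" (PySem.Str.strip b) ∧
        PySem.Str.isIn ":" (pvHead0 (PySem.Str.strip b) "|")
    · rw [if_pos h1, ihbs]
      conv_rhs => rw [runSem]
      simp only [runTry, if_pos h1, List.append_assoc]
    · rw [if_neg h1]
      by_cases h2 : PySem.Str.isIn "|" (PySem.Str.replace (PySem.Str.strip b) " - " "|") ∧
          PySem.Str.isIn ":" (pvHead0 (PySem.Str.replace (PySem.Str.strip b) " - " "|") "|")
      · rw [if_pos h2, ihbs]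
        conv_rhs => rw [runSem]
        simp only [runTry, if_neg h1, if_pos h2, List.append_assoc]
      · rw [if_neg h2]
        have hpi := psfInner_run (b :: bs) ls hrun hls
        rw [List.cons_append] at hpi
        rw [hpi]
        conv_rhs => rw [runSem]
        simp only [runTry, if_neg h1, if_neg h2]
        have hne : ∀ x ∈ List.map PySem.Str.strip (b :: bs), x ≠ "" := by
          intro x hx
          simp only [List.map_cons, List.mem_cons, List.mem_map] at hx
          rcases hx with rfl | ⟨y, hy, rfl⟩
          · exact hb
          · exact hrun y (List.mem_cons_of_mem _ hy)
        rw [psfBlock_eq_blockGo _ hne]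
        simp

-- run-structured processing of the raw line list (proof-side intermediary)
def pvF : List String → List String → List (String × String × String)
  | run, [] => runSem run
  | run, l :: ls =>
    if PySem.Str.strip l = "" then runSem run ++ pvF [] ls
    else pvF (run ++ [PySem.Str.strip l]) ls

theorem pvF_run (qs : List String) (run ls : List String)
    (hqs : ∀ x ∈ qs, PySem.Str.strip x ≠ "") :
    pvF run (qs ++ ls) = pvF (run ++ qs.map PySem.Str.strip) ls := by
  induction qs generalizing run with
  | nil => simp
  | cons q t ih =>
    have hq : PySem.Str.strip q ≠ "" := hqs q (List.mem_cons_self)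
    simp only [List.cons_append, pvF, if_neg hq]
    rw [ih (run ++ [PySem.Str.strip q]) (fun x hx => hqs x (List.mem_cons_of_mem _ hx))]
    simp

theorem psfLoop_eq_pvF (ls : List String) : psfLoop ls = pvF [] ls := by
  induction hn : ls.length using Nat.strong_induction_on generalizing ls with
  | _ n ih =>
  cases ls with
  | nil => simp [psfLoop_nil, pvF, runSem]
  | cons l rest =>
    have hn' : rest.length + 1 = n := by simpa using hn
    by_cases hl : PySem.Str.strip l = ""
    · rw [psfLoop.eq_def]
      simp only [dif_pos hl, pvF, if_pos hl]
      have : runSem [] = [] := by simp [runSem]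
      rw [this, List.nil_append]
      exact ih rest.length (by omega) rest rfl
    · set p : String → Bool := fun x => PySem.Str.strip x != "" with hp
      have hsplit : (l :: rest).takeWhile p ++ (l :: rest).dropWhile p = l :: rest :=
        List.takeWhile_append_dropWhile
      set qs := (l :: rest).takeWhile p with hqs
      set r := (l :: rest).dropWhile p with hr
      have hqsne : ∀ x ∈ qs, PySem.Str.strip x ≠ "" := by
        intro x hx
        have := List.mem_takeWhile_imp hx
        simpa [hp] using this
      have hqs0 : qs ≠ [] := by
        simp only [hqs, List.takeWhile_cons]
        simp [hp, hl]
      have hrblank : pvHeadBlank r := by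
        cases hcr : r with
        | nil => exact Or.inl rfl
        | cons b t =>
          right
          refine ⟨b, t, rfl, ?_⟩
          have : p b = false := by
            have := List.head?_dropWhile_not p (l :: rest)
            rw [← hr, hcr] at this
            simpa using this
          simpa [hp] using this
      have hlen : qs.length + r.length = n := by
        have := congrArg List.length hsplit
        simp at this
        omega
      rw [← hsplit, psfLoop_run qs r hqsne hrblank, pvF_run qs [] r hqsne, List.nil_append]
      rcases hrblank with h0 | ⟨b, t, hbt, hb⟩
      · simp [h0, pvF, psfLoop_nil]
      · rw [hbt, pvF, if_pos hb]
        congr 1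
        rw [psfLoop.eq_def]
        simp only [dif_pos hb]
        have hqlen : 0 < qs.length := List.length_pos_of_ne_nil hqs0
        have htlen : t.length < n := by
          have : r.length = t.length + 1 := by rw [hbt]; simp
          omega
        rw [ih t.length htlen t rfl]

-- ---------- B's fold reduces to the same run structure ----------

theorem altStep_blank (st : List (String × String × String) × Nat × List String) (raw : String)
    (h : PySem.Str.strip raw = "") : altStep st raw = (st.1, 0, []) := by
  simp [altStep, h]

theorem altStep_fst (a res : List (String × String × String)) (m : Nat) (g : List String)
    (raw : String) :
    altStep (a ++ res, m, g) raw =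
      (a ++ (altStep (res, m, g) raw).1, (altStep (res, m, g) raw).2) := by
  unfold altStep
  by_cases hb : PySem.Str.strip raw = ""
  · simp [hb]
  · by_cases hm2 : m = 2
    · simp [hb, hm2]
    · simp only [if_neg hb, if_neg hm2]
      cases hh : (if m = 0 then
          (match altCred (PySem.Str.strip raw) false with
           | some r => some r
           | none => altCred (PySem.Str.replace (PySem.Str.strip raw) " - " "|") true)
        else none) with
      | some r => simp
      | none =>
        split_ifs <;> simp

theorem foldl_fst_shift (ls : List String) (a res : List (String × String × String)) (m : Nat)
    (g : List String) :
    (List.foldl altStep (a ++ res, m, g) ls).1 = a ++ (List.foldl altStep (res, m, g) ls).1 := by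
  induction ls generalizing res m g with
  | nil => rfl
  | cons l t ih =>
    rw [List.foldl_cons, List.foldl_cons, altStep_fst]
    have := ih (altStep (res, m, g) l).1 (altStep (res, m, g) l).2.1 (altStep (res, m, g) l).2.2
    simpa using this

theorem foldl_mode2 (bs : List String) (h : ∀ x ∈ bs, PySem.Str.strip x ≠ "")
    (res : List (String × String × String)) (g : List String) :
    List.foldl altStep (res, 2, g) bs = (res, 2, g) := by
  induction bs with
  | nil => rfl
  | cons b t ih =>
    have hb : PySem.Str.strip b ≠ "" := h b List.mem_cons_self
    rw [List.foldl_cons]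
    have hstep : altStep (res, 2, g) b = (res, 2, g) := by simp [altStep, hb]
    rw [hstep]
    exact ih (fun x hx => h x (List.mem_cons_of_mem _ hx))

theorem foldl_block (bs : List String) (h : ∀ x ∈ bs, PySem.Str.strip x ≠ "")
    (res : List (String × String × String)) (g : List String) :
    (List.foldl altStep (res, 1, g) bs).1 = res ++ blockGo g (bs.map PySem.Str.strip) := by
  induction bs generalizing res g with
  | nil => simp [blockGo]
  | cons raw t ih =>
    have hs : PySem.Str.strip raw ≠ "" := h raw List.mem_cons_self
    have ht : ∀ x ∈ t, PySem.Str.strip x ≠ "" := fun x hx => h x (List.mem_cons_of_mem _ hx)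
    rw [List.foldl_cons, List.map_cons]
    obtain ⟨hiff, hparts⟩ := blockTest_eq (PySem.Str.strip raw)
    by_cases hcB : 0 < PySem.Str.find (PySem.Str.strip raw) ":" ∧
        ¬ PySem.Str.isIn " " (PySem.Str.slice (PySem.Str.strip raw) none
          (some (PySem.Str.find (PySem.Str.strip raw) ":"))) = true
    · obtain ⟨hcol, hu1, hu2⟩ := hiff.mp hcB
      obtain ⟨hp1, hp2⟩ := hparts hcol
      have hstep : altStep (res, 1, g) raw =
          (if PySem.Str.strip (pvSplit1 (PySem.Str.strip raw) ":").1 ≠ "" ∧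
              PySem.Str.strip (pvSplit1 (PySem.Str.strip raw) ":").2 ≠ "" then
            res ++ [(PySem.Str.strip (pvSplit1 (PySem.Str.strip raw) ":").1,
                     PySem.Str.strip (pvSplit1 (PySem.Str.strip raw) ":").2,
                     PySem.Str.join ", " g)]
          else res, 2, g) := by
        simp only [altStep, if_neg hs]
        rw [if_neg (by omega : ¬ (1 : Nat) = 2)]
        rw [if_neg (by omega : ¬ (1 : Nat) = 0)]
        rw [if_pos hcB, hp1, hp2]
        rw [if_neg (by omega : ¬ (1 : Nat) = 0)]
      rw [hstep]
      by_cases hg : PySem.Str.strip (pvSplit1 (PySem.Str.strip raw) ":").1 ≠ "" ∧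
          PySem.Str.strip (pvSplit1 (PySem.Str.strip raw) ":").2 ≠ ""
      · rw [if_pos hg, foldl_mode2 t ht]
        conv_rhs => rw [blockGo]
        simp only [if_pos hcol, if_pos (And.intro hu1 hu2), if_pos hg]
      · rw [if_neg hg, foldl_mode2 t ht]
        conv_rhs => rw [blockGo]
        simp only [if_pos hcol, if_pos (And.intro hu1 hu2), if_neg hg]
        simp
    · have hcA := (Iff.not hiff).mp hcB
      have hstep : altStep (res, 1, g) raw = (res, 1, g ++ [PySem.Str.strip raw]) := by
        simp only [altStep, if_neg hs]
        rw [if_neg (by omega : ¬ (1 : Nat) = 2)]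
        rw [if_neg (by omega : ¬ (1 : Nat) = 0)]
        rw [if_neg hcB]
        rw [if_neg (by omega : ¬ (1 : Nat) = 0)]
      rw [hstep, ih ht]
      conv_rhs => rw [blockGo]
      by_cases hcol : PySem.Str.isIn ":" (PySem.Str.strip raw) = true
      · have hup : ¬ ((pvSplit1 (PySem.Str.strip raw) ":").1 ≠ "" ∧
            ¬ PySem.Str.isIn " " (pvSplit1 (PySem.Str.strip raw) ":").1 = true) := by
          intro hup
          exact hcA ⟨hcol, hup.1, hup.2⟩
        simp only [if_pos hcol, if_neg hup]
      · simp only [if_neg hcol]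

theorem altStep_scan_none (res : List (String × String × String)) (g : List String) (raw : String)
    (hs : PySem.Str.strip raw ≠ "") (hrt : runTry (PySem.Str.strip raw) = none) :
    altStep (res, 0, g) raw = altStep (res, 1, []) raw := by
  simp only [altStep, if_neg hs, hitChain_eq, hrt]
  simp

theorem foldl_scan (qs : List String) (h : ∀ x ∈ qs, PySem.Str.strip x ≠ "")
    (res : List (String × String × String)) (g : List String) :
    (List.foldl altStep (res, 0, g) qs).1 = res ++ runSem (qs.map PySem.Str.strip) := by
  induction qs generalizing res g with
  | nil => simp [runSem]
  | cons raw t ih =>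
    have hs : PySem.Str.strip raw ≠ "" := h raw List.mem_cons_self
    have ht : ∀ x ∈ t, PySem.Str.strip x ≠ "" := fun x hx => h x (List.mem_cons_of_mem _ hx)
    rw [List.foldl_cons, List.map_cons]
    cases hrt : runTry (PySem.Str.strip raw) with
    | some r =>
      have hstep : altStep (res, 0, g) raw = (res ++ r, 0, g) := by
        simp only [altStep, if_neg hs, hitChain_eq, hrt]
        simp
      rw [hstep, ih ht]
      conv_rhs => rw [runSem]
      rw [hrt]
      simp
    | none =>
      rw [altStep_scan_none res g raw hs hrt]
      have : List.foldl altStep (altStep (res, 1, []) raw) t =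
          List.foldl altStep (res, 1, []) (raw :: t) := by rw [List.foldl_cons]
      rw [this, foldl_block (raw :: t) h res []]
      conv_rhs => rw [runSem]
      rw [hrt]
      simp

set_option maxHeartbeats 1000000 in
theorem foldl_eq_pvF (ls : List String) :
    (List.foldl altStep ([], 0, []) ls).1 = pvF [] ls := by
  induction hn : ls.length using Nat.strong_induction_on generalizing ls with
  | _ n ih =>
  cases ls with
  | nil => simp [pvF, runSem]
  | cons l rest =>
    have hn' : rest.length + 1 = n := by simpa using hn
    by_cases hl : PySem.Str.strip l = ""
    · rw [List.foldl_cons, altStep_blank _ _ hl]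
      simp only [pvF, if_pos hl]
      have h0 : runSem [] = [] := by simp [runSem]
      rw [h0, List.nil_append]
      exact ih rest.length (by omega) rest rfl
    · set p : String → Bool := fun x => PySem.Str.strip x != "" with hp
      have hsplit : (l :: rest).takeWhile p ++ (l :: rest).dropWhile p = l :: rest :=
        List.takeWhile_append_dropWhile
      set qs := (l :: rest).takeWhile p with hqs
      set r := (l :: rest).dropWhile p with hr
      have hqsne : ∀ x ∈ qs, PySem.Str.strip x ≠ "" := by
        intro x hx
        have := List.mem_takeWhile_imp hx
        simpa [hp] using this
      have hqs0 : qs ≠ [] := by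
        simp only [hqs, List.takeWhile_cons]
        simp [hp, hl]
      have hrblank : pvHeadBlank r := by
        cases hcr : r with
        | nil => exact Or.inl rfl
        | cons b t =>
          right
          refine ⟨b, t, rfl, ?_⟩
          have : p b = false := by
            have := List.head?_dropWhile_not p (l :: rest)
            rw [← hr, hcr] at this
            simpa using this
          simpa [hp] using this
      have hlen : qs.length + r.length = n := by
        have := congrArg List.length hsplit
        simp at this
        omega
      rw [← hsplit, List.foldl_append, pvF_run qs [] r hqsne, List.nil_append]
      rcases hrblank with h0 | ⟨b, t, hbt, hb⟩
      · rw [h0]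
        simp only [List.foldl_nil, pvF]
        exact foldl_scan qs hqsne [] []
      · rw [hbt, List.foldl_cons,
          altStep_blank (List.foldl altStep ([], 0, []) qs) b hb]
        have hsc := foldl_scan qs hqsne [] []
        rw [List.nil_append] at hsc
        have hshift := foldl_fst_shift t (List.foldl altStep ([], 0, []) qs).1 [] 0 []
        rw [List.append_nil] at hshift
        rw [hshift, hsc]
        simp only [pvF, if_pos hb]
        congr 1
        have hqlen : 0 < qs.length := List.length_pos_of_ne_nil hqs0
        have htlen : t.length < n := by
          have : r.length = t.length + 1 := by rw [hbt]; simp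
          omega
        exact ih t.length htlen t rfl

-- A strips after rstripping; B strips directly: the runs are the same
theorem pvF_rstrip (ls run : List String) :
    pvF run (ls.map PySem.Str.rstrip) = pvF run ls := by
  induction ls generalizing run with
  | nil => rfl
  | cons l t ih =>
    simp only [List.map_cons, pvF, pvStripRstrip]
    by_cases hl : PySem.Str.strip l = ""
    · rw [if_pos hl, if_pos hl, ih]
    · rw [if_neg hl, if_neg hl, ih]

-- ===== VERDICT (by name: the statement is the Claim_ definition above) =====
theorem parse_steam_file_spec : Claim_equal_parse_steam_file := by
  intro text _
  unfold Spec_parse_steam_file parse_steam_file parse_steam_file_alt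
  rw [psfLoop_eq_pvF, pvF_rstrip, ← foldl_eq_pvF]
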